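-- pv_equiv track=rewrite | github.com/hqQuick/barricade | barricade/feed_derived_dna/analysis.py | _expand_macro_token
-- ===== SOURCE A (Python) =====
-- from collections.abc import Mapping, Sequence
--
-- def _expand_macro_token(
--     token: str,
--     macro_lookup: Mapping[str, tuple[str, ...]],
--     remaining_depth: int,
--     ancestry: tuple[str, ...],
-- ) -> tuple[str, ...]:
--     expansion = macro_lookup.get(token)
--     if expansion is None or not expansion:
--         return (token,)
--     if remaining_depth <= 0 or token in ancestry:
--         return (token,)
--
--     next_ancestry = ancestry + (token,)
--     expanded: list[str] = []
--     for child in expansion: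
--         expanded.extend(
--             _expand_macro_token(child, macro_lookup, remaining_depth - 1, next_ancestry)
--         )
--     return tuple(expanded)
-- ===== SOURCE B (Python) =====
-- def _expand_macro_token(token, macro_lookup, remaining_depth, ancestry):
--     # Iterative depth-first traversal with an explicit stack instead of recursion.
--     output = []
--     stack = [(token, remaining_depth, ancestry)]
--     while stack:
--         tok, depth, anc = stack.pop()
--         expansion = macro_lookup.get(tok)
--         if expansion is None or not expansion or depth <= 0 or tok in anc:
--             output.append(tok)
--         else:
--             next_anc = anc + (tok,)
--             for child in reversed(expansion):
--                 stack.append((child, depth - 1, next_anc))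
--     return tuple(output)
-- ===== Notes on version B (the rewrite author's own statement) =====
-- stated objective: alternative
-- what changed: Replaces A's recursion with an explicit-stack iterative depth-first loop carrying (token, remaining_depth, ancestry) frames and appending terminal tokens to one output list.
import Mathlib
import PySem

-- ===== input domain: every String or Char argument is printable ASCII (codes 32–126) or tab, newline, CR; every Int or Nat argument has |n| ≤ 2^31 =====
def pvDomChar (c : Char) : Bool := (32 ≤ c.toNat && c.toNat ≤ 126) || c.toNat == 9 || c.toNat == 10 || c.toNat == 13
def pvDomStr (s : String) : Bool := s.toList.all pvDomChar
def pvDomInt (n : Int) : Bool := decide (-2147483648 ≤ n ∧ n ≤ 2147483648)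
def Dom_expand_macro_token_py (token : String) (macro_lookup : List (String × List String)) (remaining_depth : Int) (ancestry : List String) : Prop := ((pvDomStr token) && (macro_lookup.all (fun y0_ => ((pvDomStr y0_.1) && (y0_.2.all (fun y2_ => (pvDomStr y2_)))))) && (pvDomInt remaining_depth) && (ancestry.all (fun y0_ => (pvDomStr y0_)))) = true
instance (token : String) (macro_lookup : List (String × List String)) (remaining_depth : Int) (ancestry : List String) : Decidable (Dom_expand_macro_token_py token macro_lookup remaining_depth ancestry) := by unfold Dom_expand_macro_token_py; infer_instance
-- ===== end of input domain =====

-- B rewrites A's recursion as an explicit-stack depth-first loop (different decomposition, same cost).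

-- ===== PORT A =====
-- literal port of the recursive A; recursion well-founded on remaining_depth.toNat
def expand_macro_token_py (token : String) (macro_lookup : List (String × List String)) (remaining_depth : Int) (ancestry : List String) : List String :=
  match (PySem.Dict.mk macro_lookup).get? token with
  | none => [token]
  | some expansion =>
    if expansion = [] then [token]
    else if hd : remaining_depth ≤ 0 ∨ ancestry.contains token then [token]
    else
      expansion.attach.foldl
        (fun expanded child =>
          expanded ++ expand_macro_token_py child.1 macro_lookup (remaining_depth - 1) (ancestry ++ [token]))
        []
termination_by remaining_depth.toNat
decreasing_by
  push_neg at hd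
  omega

-- ===== PORT B =====
-- bound on expansion lengths, used only for the loop's termination measure
def pvMaxExp (macro_lookup : List (String × List String)) : Nat :=
  macro_lookup.foldr (fun p m => max p.2.length m) 0


-- cited by the loop's decreasing_by: a looked-up expansion is no longer than pvMaxExp
theorem pvGetLenLe (macro_lookup : List (String × List String)) (t : String) (v : List String)
    (h : (PySem.Dict.mk macro_lookup).get? t = some v) : v.length ≤ pvMaxExp macro_lookup := by
  induction macro_lookup with
  | nil => simp [PySem.Dict.get?] at h
  | cons p rest ih =>
    rw [show (PySem.Dict.mk (p :: rest)) = PySem.Dict.mk ((p.1, p.2) :: rest) from rfl,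
        PySem.Dict.get?_mk_cons] at h
    unfold pvMaxExp
    simp only [List.foldr_cons]
    by_cases hk : (p.1 == t) = true
    · have hv : p.2 = v := by simpa [hk] using h
      subst hv
      exact Nat.le_max_left _ _
    · simp [hk] at h
      have hrec := ih h
      unfold pvMaxExp at hrec
      exact le_trans hrec (Nat.le_max_right _ _)

-- the while-stack loop of Source B; stack head = top of stack
def expand_macro_token_py_alt_loop (macro_lookup : List (String × List String))
    (stack : List (String × Int × List String)) (output : List String) : List String :=
  match stack with
  | [] => output
  | (tok, depth, anc) :: rest =>
    match hget : (PySem.Dict.mk macro_lookup).get? tok with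
    | none => expand_macro_token_py_alt_loop macro_lookup rest (output ++ [tok])
    | some expansion =>
      if hstop : expansion = [] ∨ depth ≤ 0 ∨ anc.contains tok then
        expand_macro_token_py_alt_loop macro_lookup rest (output ++ [tok])
      else
        expand_macro_token_py_alt_loop macro_lookup
          (expansion.map (fun child => (child, depth - 1, anc ++ [tok])) ++ rest) output
termination_by (stack.map (fun f => (pvMaxExp macro_lookup + 1) ^ (f.2.1.toNat + 1))).sum
decreasing_by
  · simp
  · simp
  · push_neg at hstop
    obtain ⟨hne, hdpos, _⟩ := hstop
    have hlen : expansion.length ≤ pvMaxExp macro_lookup := pvGetLenLe macro_lookup tok expansion hget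
    have hdt : (depth - 1).toNat + 1 = depth.toNat := by omega
    simp only [List.map_append, List.sum_append, List.map_map, List.map_cons, List.sum_cons]
    have hfun : ((fun f : String × Int × List String => (pvMaxExp macro_lookup + 1) ^ (f.2.1.toNat + 1)) ∘
        fun child => (child, depth - 1, anc ++ [tok]))
        = fun _ : String => (pvMaxExp macro_lookup + 1) ^ depth.toNat := by
      funext c
      simp only [Function.comp_apply]
      rw [hdt]
    rw [hfun, List.map_const', List.sum_replicate, smul_eq_mul]
    have hlt : expansion.length * (pvMaxExp macro_lookup + 1) ^ depth.toNat
        < (pvMaxExp macro_lookup + 1) ^ (depth.toNat + 1) := by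
      calc expansion.length * (pvMaxExp macro_lookup + 1) ^ depth.toNat
          ≤ pvMaxExp macro_lookup * (pvMaxExp macro_lookup + 1) ^ depth.toNat :=
            Nat.mul_le_mul_right _ hlen
        _ < (pvMaxExp macro_lookup + 1) * (pvMaxExp macro_lookup + 1) ^ depth.toNat :=
            mul_lt_mul_of_pos_right (Nat.lt_succ_self _) (pow_pos (Nat.succ_pos _) _)
        _ = (pvMaxExp macro_lookup + 1) ^ (depth.toNat + 1) := (pow_succ' _ _).symm
    omega

def expand_macro_token_py_alt (token : String) (macro_lookup : List (String × List String)) (remaining_depth : Int) (ancestry : List String) : List String :=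
  expand_macro_token_py_alt_loop macro_lookup [(token, remaining_depth, ancestry)] []

-- ===== PRECONDITION & SPEC =====
def Spec_expand_macro_token_py (token : String) (macro_lookup : List (String × List String)) (remaining_depth : Int) (ancestry : List String) (out : List String) : Prop := out = expand_macro_token_py_alt token macro_lookup remaining_depth ancestry
instance (token : String) (macro_lookup : List (String × List String)) (remaining_depth : Int) (ancestry : List String) (out : List String) : Decidable (Spec_expand_macro_token_py token macro_lookup remaining_depth ancestry out) := by unfold Spec_expand_macro_token_py; infer_instance

-- ===== CLAIM (what is proved, stated in full; the proofs are below) =====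
def Claim_equal_expand_macro_token_py : Prop := ∀ (token : String) (macro_lookup : List (String × List String)) (remaining_depth : Int) (ancestry : List String), Dom_expand_macro_token_py token macro_lookup remaining_depth ancestry → Spec_expand_macro_token_py token macro_lookup remaining_depth ancestry (expand_macro_token_py token macro_lookup remaining_depth ancestry)

-- ===== LEMMAS AND PROOFS =====

theorem A_none (tok : String) (ml : List (String × List String)) (d : Int) (anc : List String)
    (h : (PySem.Dict.mk ml).get? tok = none) :
    expand_macro_token_py tok ml d anc = [tok] := by
  rw [expand_macro_token_py.eq_def]; simp [h]

theorem A_stop (tok : String) (ml : List (String × List String)) (d : Int) (anc : List String)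
    (exp : List String) (h : (PySem.Dict.mk ml).get? tok = some exp)
    (hs : exp = [] ∨ d ≤ 0 ∨ anc.contains tok = true) :
    expand_macro_token_py tok ml d anc = [tok] := by
  rw [expand_macro_token_py.eq_def]
  rcases hs with h1 | h1 | h1
  · simp [h, h1]
  · simp [h, h1]
  · have hm : tok ∈ anc := by simpa using h1
    simp [h, hm]

theorem A_go (tok : String) (ml : List (String × List String)) (d : Int) (anc : List String)
    (exp : List String) (h : (PySem.Dict.mk ml).get? tok = some exp)
    (hs : ¬(exp = [] ∨ d ≤ 0 ∨ anc.contains tok = true)) :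
    expand_macro_token_py tok ml d anc
      = exp.flatMap (fun c => expand_macro_token_py c ml (d - 1) (anc ++ [tok])) := by
  push_neg at hs
  obtain ⟨h1, h2, h3⟩ := hs
  rw [expand_macro_token_py.eq_def]
  simp only [h, if_neg h1]
  rw [dif_neg (by push_neg; exact ⟨h2, by simpa using h3⟩)]
  rw [PySem.List.foldl_append_eq_flatMap]
  simp [List.flatMap]

theorem loop_nil (ml : List (String × List String)) (out : List String) :
    expand_macro_token_py_alt_loop ml [] out = out := by
  rw [expand_macro_token_py_alt_loop]

theorem loop_none (ml : List (String × List String)) (tok : String) (d : Int) (anc : List String)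
    (rest : List (String × Int × List String)) (out : List String)
    (hget : (PySem.Dict.mk ml).get? tok = none) :
    expand_macro_token_py_alt_loop ml ((tok, d, anc) :: rest) out
      = expand_macro_token_py_alt_loop ml rest (out ++ [tok]) := by
  rw [expand_macro_token_py_alt_loop.eq_def]
  simp only []
  split <;> simp_all

theorem loop_stop (ml : List (String × List String)) (tok : String) (d : Int) (anc : List String)
    (rest : List (String × Int × List String)) (out : List String) (exp : List String)
    (hget : (PySem.Dict.mk ml).get? tok = some exp)
    (hs : exp = [] ∨ d ≤ 0 ∨ anc.contains tok = true) :
    expand_macro_token_py_alt_loop ml ((tok, d, anc) :: rest) out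
      = expand_macro_token_py_alt_loop ml rest (out ++ [tok]) := by
  rw [expand_macro_token_py_alt_loop.eq_def]
  simp only []
  split <;> simp_all

theorem loop_go (ml : List (String × List String)) (tok : String) (d : Int) (anc : List String)
    (rest : List (String × Int × List String)) (out : List String) (exp : List String)
    (hget : (PySem.Dict.mk ml).get? tok = some exp)
    (hs : ¬(exp = [] ∨ d ≤ 0 ∨ anc.contains tok = true)) :
    expand_macro_token_py_alt_loop ml ((tok, d, anc) :: rest) out
      = expand_macro_token_py_alt_loop ml (exp.map (fun c => (c, d - 1, anc ++ [tok])) ++ rest) out := by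
  rw [expand_macro_token_py_alt_loop.eq_def]
  simp only []
  split <;> simp_all

theorem loop_eq_flatMap (macro_lookup : List (String × List String))
    (stack : List (String × Int × List String)) (output : List String) :
    expand_macro_token_py_alt_loop macro_lookup stack output
      = output ++ stack.flatMap (fun f => expand_macro_token_py f.1 macro_lookup f.2.1 f.2.2) := by
  induction stack, output using expand_macro_token_py_alt_loop.induct macro_lookup with
  | case1 output => simp [loop_nil]
  | case2 output tok depth anc rest hget ih =>
      rw [loop_none macro_lookup tok depth anc rest output hget, ih,
        A_none tok macro_lookup depth anc hget |>.symm]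
      simp [A_none tok macro_lookup depth anc hget]
  | case3 output tok depth anc rest expansion hget hstop ih =>
      rw [loop_stop macro_lookup tok depth anc rest output expansion hget hstop, ih]
      simp [A_stop tok macro_lookup depth anc expansion hget hstop]
  | case4 output tok depth anc rest expansion hget hstop ih =>
      rw [loop_go macro_lookup tok depth anc rest output expansion hget hstop, ih]
      simp [A_go tok macro_lookup depth anc expansion hget hstop, List.flatMap_append,
        List.flatMap_map]

-- ===== VERDICT (by name: the statement is the Claim_ definition above) =====
theorem expand_macro_token_py_spec : Claim_equal_expand_macro_token_py := by
  intro token ml d anc _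
  unfold Spec_expand_macro_token_py expand_macro_token_py_alt
  rw [loop_eq_flatMap]
  simp
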